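-- pv_equiv track=rewrite | github.com/miguelcorrea/Ouroboros | code/src/contacts.py | find_constant_columns
-- ===== SOURCE A (Python) =====
-- def find_constant_columns(msa):
--     """
--     Given a multiple sequence alignment, return indexes of columns that stay
--     constant.
--     """
--     msa = [str(seq) for seq in iter(msa)]
--     msa = list(zip(*msa))
--
--     # Collect indices of columns that stay constant
--     constant_idxs = []
--     for idx, row in enumerate(msa):
--         if len(set(row)) == 1:
--             constant_idxs.append(idx)
--
--     return constant_idxs
-- ===== SOURCE B (Python) =====
-- def find_constant_columns(msa):
--     seqs = [str(seq) for seq in msa]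
--     if not seqs:
--         return []
--     first = seqs[0]
--     n = min(len(s) for s in seqs)
--     return [j for j in range(n) if all(s[j] == first[j] for s in seqs)]
-- ===== Notes on version B (the rewrite author's own statement) =====
-- stated objective: simpler
-- what changed: Scans column indexes up to the minimum length comparing each column against the first sequence's character in place, instead of materialising a transposed list with zip(*) and reducing each column through a set.
import Mathlib
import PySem

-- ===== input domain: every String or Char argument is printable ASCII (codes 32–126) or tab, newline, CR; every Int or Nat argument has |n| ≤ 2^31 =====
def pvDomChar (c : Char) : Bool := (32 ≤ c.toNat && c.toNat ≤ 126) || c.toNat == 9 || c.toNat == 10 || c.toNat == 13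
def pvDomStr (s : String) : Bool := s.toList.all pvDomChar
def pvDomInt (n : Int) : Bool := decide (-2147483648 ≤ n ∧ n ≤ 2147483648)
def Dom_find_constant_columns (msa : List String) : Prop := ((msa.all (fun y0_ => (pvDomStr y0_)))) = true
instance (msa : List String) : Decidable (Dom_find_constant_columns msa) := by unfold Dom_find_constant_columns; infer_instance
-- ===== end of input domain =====

-- B scans column indexes up to the minimum length comparing each column against the
-- first sequence in place, instead of building a transposed list with zip(*) and
-- reducing each column through a set (objective: simpler).

-- ===== PORT A =====
-- zip(*msa): repeatedly take the head of every list until some list is exhausted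
def pvZipStar (xs : List (List Char)) : List (List Char) :=
  match xs with
  | [] => []
  | l :: ls =>
    if (l :: ls).any (fun s => s.isEmpty) then []
    else ((l :: ls).map (fun s => s.headD ' ')) :: pvZipStar ((l :: ls).map (fun s => s.tail))
termination_by (xs.headD []).length
decreasing_by
  rename_i h
  simp only [List.any_cons, Bool.or_eq_true, List.isEmpty_iff, not_or] at h
  simp only [List.map_cons, List.headD_cons]
  cases l with
  | nil => exact absurd rfl h.1
  | cons c t => simp

def find_constant_columns (msa : List String) : List Int :=
  let rows := pvZipStar (msa.map (fun s => s.toList))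
  (PySem.List.enumerate rows 0).foldl
    (fun acc p => if PySem.Set.len (PySem.Set.ofList p.2) = 1 then acc ++ [p.1] else acc) []

-- ===== PORT B =====
def find_constant_columns_alt (msa : List String) : List Int :=
  match msa with
  | [] => []
  | s0 :: rest =>
    let n : Int := rest.foldl (fun m s => min m (PySem.Str.len s)) (PySem.Str.len s0)
    (PySem.List.pyRange 0 n 1).filter
      (fun j => (s0 :: rest).all (fun s => PySem.Str.pyGet? s j == PySem.Str.pyGet? s0 j))

-- ===== PRECONDITION & SPEC =====
def Spec_find_constant_columns (msa : List String) (out : List Int) : Prop := out = find_constant_columns_alt msa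
instance (msa : List String) (out : List Int) : Decidable (Spec_find_constant_columns msa out) := by unfold Spec_find_constant_columns; infer_instance

-- ===== CLAIM (what is proved, stated in full; the proofs are below) =====
def Claim_equal_find_constant_columns : Prop := ∀ (msa : List String), Dom_find_constant_columns msa → Spec_find_constant_columns msa (find_constant_columns msa)

-- ===== LEMMAS AND PROOFS =====

def pvMinLen : List (List Char) → Nat
  | [] => 0
  | l :: ls => ls.foldl (fun m t => min m t.length) l.length

theorem foldl_min_le_init (ls : List (List Char)) (a : Nat) :
    ls.foldl (fun m t => min m t.length) a ≤ a := by
  induction ls generalizing a with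
  | nil => simp
  | cons t ts ih => exact le_trans (ih _) (min_le_left _ _)

theorem foldl_min_le_mem (ls : List (List Char)) (a : Nat) (t : List Char) (ht : t ∈ ls) :
    ls.foldl (fun m t => min m t.length) a ≤ t.length := by
  induction ls generalizing a with
  | nil => simp at ht
  | cons u us ih =>
    simp only [List.foldl_cons]
    rcases List.mem_cons.mp ht with h | h
    · subst h; exact le_trans (foldl_min_le_init us _) (min_le_right _ _)
    · exact ih _ h

theorem foldl_min_tail (ls : List (List Char)) (a : Nat) :
    (ls.map (fun t => t.tail)).foldl (fun m t => min m t.length) (a - 1)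
      = ls.foldl (fun m t => min m t.length) a - 1 := by
  induction ls generalizing a with
  | nil => simp
  | cons t ts ih =>
    simp only [List.map_cons, List.foldl_cons]
    rw [show min (a - 1) t.tail.length = min a t.length - 1 by
      simp [List.length_tail]; omega]
    exact ih _

theorem headD_eq_getD (t : List Char) : t.headD ' ' = t.getD 0 ' ' := by
  cases t <;> simp [List.getD]

theorem foldl_min_lb (ls : List (List Char)) (a b : Nat) (ha : b ≤ a)
    (h : ∀ t ∈ ls, b ≤ t.length) :
    b ≤ ls.foldl (fun m t => min m t.length) a := by
  induction ls generalizing a with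
  | nil => simpa using ha
  | cons u us ih =>
    simp only [List.foldl_cons]
    exact ih _ (le_min ha (h u (by simp))) (fun t ht => h t (by simp [ht]))

theorem pvZipStar_eq (xs : List (List Char)) :
    pvZipStar xs = (List.range (pvMinLen xs)).map (fun j => xs.map (fun l => l.getD j ' ')) := by
  induction xs using pvZipStar.induct with
  | case1 => simp [pvZipStar, pvMinLen]
  | case2 l ls h =>
    have h0 : pvMinLen (l :: ls) = 0 := by
      rcases List.any_eq_true.mp h with ⟨t, ht, hte⟩
      have hl : t.length = 0 := by
        cases t
        · rfl
        · simp at hte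
      rcases List.mem_cons.mp ht with h1 | h1
      · subst h1
        have := foldl_min_le_init ls t.length
        simp only [pvMinLen]; omega
      · have := foldl_min_le_mem ls l.length t h1
        simp only [pvMinLen]; omega
    rw [pvZipStar, if_pos h, h0]
    simp only [List.range_zero, List.map_nil]
  | case3 l ls h ih =>
    have hne : ∀ t ∈ l :: ls, t ≠ [] := by
      intro t ht e
      exact h (List.any_eq_true.mpr ⟨t, ht, by simp [e]⟩)
    have hlb : 1 ≤ pvMinLen (l :: ls) := by
      simp only [pvMinLen]
      exact foldl_min_lb ls l.length 1
        (Nat.one_le_iff_ne_zero.mpr (by simpa using hne l (by simp)))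
        (fun t ht => Nat.one_le_iff_ne_zero.mpr
          (by simpa using hne t (by simp [ht])))
    have hpos : pvMinLen (l :: ls) = pvMinLen ((l :: ls).map (fun t => t.tail)) + 1 := by
      simp only [pvMinLen, List.map_cons]
      rw [show l.tail.length = l.length - 1 from by simp, foldl_min_tail]
      simp only [pvMinLen] at hlb
      omega
    rw [pvZipStar, if_neg h, ih, hpos, List.range_succ_eq_map]
    simp only [List.map_cons, List.map_map]
    congr 1
    · congr 1
      · exact headD_eq_getD l
      · exact List.map_congr_left (fun t _ => headD_eq_getD t)
    · apply List.map_congr_left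
      intro j _
      simp [Function.comp, Nat.succ_eq_add_one]

theorem foldl_if_append {β : Type} (p : β → Prop) [DecidablePred p] (f : β → Int)
    (l : List β) (acc : List Int) :
    l.foldl (fun acc x => if p x then acc ++ [f x] else acc) acc
      = acc ++ (l.filter (fun x => decide (p x))).map f := by
  induction l generalizing acc with
  | nil => simp
  | cons x t ih =>
    simp only [List.foldl_cons, List.filter_cons]
    by_cases h : p x <;> simp [h, ih]

theorem setlen_one (a : Char) (t : List Char) :
    PySem.Set.len (PySem.Set.ofList (a :: t)) = 1 ↔ ∀ x ∈ t, x = a := by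
  rw [← PySem.List.dedup_eq_ofList]
  have hmem := PySem.List.mem_dedup (a :: t)
  have hnd := PySem.List.nodup_dedup (a :: t)
  have ha : a ∈ PySem.List.dedup (a :: t) := (hmem a).mpr (by simp)
  unfold PySem.Set.len
  constructor
  · intro hlen x hx
    have h1 : (PySem.List.dedup (a :: t)).length = 1 := by exact_mod_cast hlen
    obtain ⟨b, hb⟩ := List.length_eq_one_iff.mp h1
    rw [hb] at ha hmem
    have hxb : x ∈ [b] := (hmem x).mpr (by simp [hx])
    simp at ha hxb
    rw [hxb, ha]
  · intro hall
    have hsub : ∀ x ∈ PySem.List.dedup (a :: t), x = a := by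
      intro x hx
      rcases List.mem_cons.mp ((hmem x).mp hx) with h1 | h1
      · exact h1
      · exact hall x h1
    have : PySem.List.dedup (a :: t) = [a] := by
      cases hd : PySem.List.dedup (a :: t) with
      | nil => rw [hd] at ha; simp at ha
      | cons b bs =>
        rw [hd] at hsub hnd
        have hb : b = a := hsub b (by simp)
        cases bs with
        | nil => rw [hb]
        | cons c cs =>
          have hc : c = a := hsub c (by simp)
          have hbn := (List.nodup_cons.mp hnd).1
          rw [hb, hc] at hbn
          simp at hbn
    rw [this]
    rfl

theorem min_fold_cast (rest : List String) (a : Nat) :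
    rest.foldl (fun m s => min m (PySem.Str.len s)) (a : Int)
      = (((rest.map String.toList).foldl (fun m t => min m t.length) a : Nat) : Int) := by
  induction rest generalizing a with
  | nil => simp
  | cons u us ih =>
    simp only [List.foldl_cons, List.map_cons]
    rw [show min (a : Int) (PySem.Str.len u) = ((min a u.toList.length : Nat) : Int) from by
      simp [PySem.Str.len, Nat.cast_min], ih]

-- ===== VERDICT (by name: the statement is the Claim_ definition above) =====
theorem str_pyGet_eq (s : String) (k : Nat) (hk : k < s.toList.length) :
    PySem.Str.pyGet? s (k : Int) = some (s.toList.getD k ' ') := by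
  show PySem.List.pyGet? s.toList (k : Int) = some (s.toList.getD k ' ')
  rw [PySem.List.pyGet?_natCast, List.getElem?_eq_getElem hk]
  rw [List.getD_eq_getElem _ _ hk]

theorem col_cond_eq (s0 : String) (rest : List String) (k : Nat)
    (hb : ∀ t ∈ (s0 :: rest).map String.toList, k < t.length) :
    decide (PySem.Set.len (PySem.Set.ofList
        (((s0 :: rest).map String.toList).map (fun l => l.getD k ' '))) = 1)
      = (s0 :: rest).all
        (fun s => PySem.Str.pyGet? s (k : Int) == PySem.Str.pyGet? s0 (k : Int)) := by
  have hget : ∀ s ∈ s0 :: rest, PySem.Str.pyGet? s (k : Int) = some (s.toList.getD k ' ') :=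
    fun s hs => str_pyGet_eq s k (hb s.toList (List.mem_map_of_mem hs))
  simp only [List.map_cons, List.map_map]
  simp only [setlen_one]
  have hiff : (∀ x ∈ rest.map ((fun l => l.getD k ' ') ∘ String.toList),
        x = s0.toList.getD k ' ') ↔
      ((s0 :: rest).all
        (fun s => PySem.Str.pyGet? s (k : Int) == PySem.Str.pyGet? s0 (k : Int)) = true) := by
    simp only [List.all_eq_true, List.mem_map, Function.comp]
    constructor
    · intro hA s hs
      rw [hget s hs, hget s0 (by simp)]
      rcases List.mem_cons.mp hs with rfl | hs'
      · simp
      · have := hA _ ⟨s, hs', rfl⟩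
        simpa using this
    · rintro hA x ⟨s, hs, rfl⟩
      have h1 := hA s (by simp [hs])
      rw [hget s (by simp [hs]), hget s0 (by simp)] at h1
      simpa using h1
  rcases Bool.eq_false_or_eq_true ((s0 :: rest).all
      (fun s => PySem.Str.pyGet? s (k : Int) == PySem.Str.pyGet? s0 (k : Int))) with hB | hB
  · rw [hB]
    exact decide_eq_true (hiff.mpr hB)
  · rw [hB]
    exact decide_eq_false (fun hP => by rw [hiff.mp hP] at hB; exact Bool.noConfusion hB)

theorem find_constant_columns_spec : Claim_equal_find_constant_columns := by
  intro msa _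
  unfold Spec_find_constant_columns
  cases msa with
  | nil =>
    simp [find_constant_columns, find_constant_columns_alt, pvZipStar]
  | cons s0 rest =>
    have hA : find_constant_columns (s0 :: rest) =
        (PySem.List.enumerate (pvZipStar ((s0 :: rest).map String.toList)) 0).foldl
          (fun acc p => if PySem.Set.len (PySem.Set.ofList p.2) = 1 then acc ++ [p.1] else acc)
          [] := rfl
    have hB : find_constant_columns_alt (s0 :: rest) =
        (PySem.List.pyRange 0
            (rest.foldl (fun m s => min m (PySem.Str.len s)) (PySem.Str.len s0)) 1).filter
          (fun j => (s0 :: rest).all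
            (fun s => PySem.Str.pyGet? s j == PySem.Str.pyGet? s0 j)) := rfl
    rw [hA, hB]
    set ls := (s0 :: rest).map String.toList with hls
    set nm := pvMinLen ls with hnm
    have hmin : pvMinLen ls = (rest.map String.toList).foldl
        (fun m t => min m t.length) s0.toList.length := by
      rw [hls]; simp only [List.map_cons, pvMinLen]
    have hb : ∀ t ∈ ls, nm ≤ t.length := by
      intro t ht
      rw [hls] at ht
      simp only [List.map_cons, List.mem_cons, List.mem_map] at ht
      rw [hnm, hmin]
      rcases ht with h1 | ⟨s, hs, rfl⟩
      · subst h1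
        exact foldl_min_le_init _ _
      · exact foldl_min_le_mem _ _ _ (List.mem_map_of_mem hs)
    -- A side
    rw [pvZipStar_eq, ← hnm]
    set rows := (List.range nm).map (fun j => ls.map (fun l => l.getD j ' ')) with hrows
    have hlen : PySem.List.len rows = (nm : Int) := by
      simp [PySem.List.len, hrows]
    rw [PySem.List.enumerate_eq_map_pyRange rows []]
    rw [foldl_if_append (fun q : Int × List Char => PySem.Set.len (PySem.Set.ofList q.2) = 1)
      Prod.fst]
    simp only [List.nil_append, List.filter_map, List.map_map, hlen, Function.comp_def,
      List.map_id']
    -- B side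
    have hn : rest.foldl (fun m s => min m (PySem.Str.len s)) (PySem.Str.len s0) = (nm : Int) := by
      rw [show PySem.Str.len s0 = ((s0.toList.length : Nat) : Int) from rfl, min_fold_cast]
      rw [hnm, hmin]
    rw [hn]
    -- pointwise
    apply List.filter_congr
    intro j hj
    obtain ⟨hj0, hjn⟩ := PySem.List.mem_pyRange_one.mp hj
    obtain ⟨k, rfl⟩ : ∃ k : Nat, j = (k : Int) := ⟨j.toNat, (Int.toNat_of_nonneg hj0).symm⟩
    have hk : k < nm := by exact_mod_cast hjn
    have hget : PySem.List.pyGetD rows (k : Int) [] = ls.map (fun l => l.getD k ' ') := by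
      rw [PySem.List.pyGetD_natCast, hrows]
      rw [List.getD_eq_getElem _ _ (by simpa using hk)]
      simp
    rw [hget]
    exact col_cond_eq s0 rest k (fun t ht => lt_of_lt_of_le hk (hb t ht))
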